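-- pv_equiv track=rewrite | github.com/stormrider94/codewars_attempt | calculate_string_rotation.py | shifted_diff
-- ===== SOURCE A (Python) =====
-- def shifted_diff(first, second):
--     # how many times should we shift the first to get the second. let's call it n
--     if first == second:
--         return 0
--     for i in range(len(first)):
--         shifted_word = first[-i:] + first[:len(first)-i]
--         if shifted_word == second:
--             return i
--     # we never got a valid shift
--     return -1
-- ===== SOURCE B (Python) =====
-- def shifted_diff(first, second):
--     # Search `second` inside the doubled string with the C-level rfind;
--     # the highest match position in [1, n-1] gives the smallest right-shift n - p.
--     if first == second:
--         return 0
--     n = len(first)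
--     if len(second) != n:
--         return -1
--     p = (first + first).rfind(second, 1, 2 * n - 1)
--     return -1 if p == -1 else n - p
-- ===== Notes on version B (the rewrite author's own statement) =====
-- stated objective: faster
-- what changed: Instead of building and comparing every rotation of `first` (a Python-level loop with O(n) slicing per shift), B runs one C-level rfind of `second` over `first+first` restricted to [1, 2n-1) and maps the highest match position p to the smallest shift n - p.
-- intended difference: When second equals first+first (first nonempty), A's i=0 iteration builds first[-0:]+first[:n] = first+first and returns 0 although second is not a rotation of first (a 0-shift would require first == second); B returns the intended -1. — e.g. on shifted_diff("a", "aa"): A returns 0, B returns -1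
import Mathlib
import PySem

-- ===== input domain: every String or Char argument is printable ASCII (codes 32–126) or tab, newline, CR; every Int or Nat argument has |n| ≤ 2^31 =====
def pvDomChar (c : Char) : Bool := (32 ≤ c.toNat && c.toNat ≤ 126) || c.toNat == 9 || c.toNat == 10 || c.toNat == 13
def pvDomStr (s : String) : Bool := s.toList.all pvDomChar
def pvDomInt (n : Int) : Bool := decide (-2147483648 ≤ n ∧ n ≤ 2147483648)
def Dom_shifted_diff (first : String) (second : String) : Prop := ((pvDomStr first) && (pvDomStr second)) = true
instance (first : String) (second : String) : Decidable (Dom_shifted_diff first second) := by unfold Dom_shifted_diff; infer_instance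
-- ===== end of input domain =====

-- B replaces A's quadratic rotate-and-compare loop by one C-level rfind of `second`
-- in `first + first` (highest match p in [1, n-1] gives the smallest shift n - p).

-- ===== PORT A =====
-- the `for i in range(len(first))` loop, first match wins, -1 if exhausted
def pvALoop (f sec : List Char) : List Int → Int
  | [] => -1
  | i :: rest =>
    if (PySem.List.slice f (some (-i)) none ++ PySem.List.slice f none (some ((f.length : Int) - i))) == sec then i
    else pvALoop f sec rest

def shifted_diff (first : String) (second : String) : Int :=
  if first == second then 0
  else pvALoop first.toList second.toList (PySem.List.pyRange 0 (first.toList.length : Int) 1)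

-- ===== PORT B =====
def shifted_diff_alt (first : String) (second : String) : Int :=
  if first == second then 0
  else
    let n : Int := (first.toList.length : Int)
    if (second.toList.length : Int) ≠ n then -1
    else
      let p := PySem.Chars.rfindFrom (first.toList ++ first.toList) second.toList 1 (some (2 * n - 1))
      if p = -1 then -1 else n - p

-- ===== PRECONDITION & SPEC =====
-- When `second = first + first` (first nonempty), A's i = 0 slice `first[-0:]` means the
-- whole string, so A returns 0 although `second` is not a rotation of `first` (a 0-shift
-- would mean first == second); B returns the intended -1.
def D_shifted_diff (first : String) (second : String) : Prop :=
  first.toList ≠ [] ∧ second.toList = first.toList ++ first.toList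
instance (first : String) (second : String) : Decidable (D_shifted_diff first second) := by
  unfold D_shifted_diff; infer_instance

def Spec_shifted_diff (first : String) (second : String) (out : Int) : Prop :=
  ¬ D_shifted_diff first second → out = shifted_diff_alt first second
instance (first : String) (second : String) (out : Int) : Decidable (Spec_shifted_diff first second out) := by
  unfold Spec_shifted_diff; infer_instance

def pvDiffWitness_shifted_diff : String × String := ("a", "aa")
def pvDiffWitnessOut_shifted_diff : Int × Int := (0, -1)

-- ===== CLAIM (what is proved, stated in full; the proofs are below) =====
def Claim_unchanged_shifted_diff : Prop := ∀ (first : String) (second : String), Dom_shifted_diff first second → Spec_shifted_diff first second (shifted_diff first second)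
def Claim_changed_shifted_diff : Prop := Dom_shifted_diff (pvDiffWitness_shifted_diff.1) (pvDiffWitness_shifted_diff.2) ∧ D_shifted_diff (pvDiffWitness_shifted_diff.1) (pvDiffWitness_shifted_diff.2) ∧ shifted_diff (pvDiffWitness_shifted_diff.1) (pvDiffWitness_shifted_diff.2) = pvDiffWitnessOut_shifted_diff.1 ∧ shifted_diff_alt (pvDiffWitness_shifted_diff.1) (pvDiffWitness_shifted_diff.2) = pvDiffWitnessOut_shifted_diff.2 ∧ pvDiffWitnessOut_shifted_diff.1 ≠ pvDiffWitnessOut_shifted_diff.2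
def Claim_exact_shifted_diff : Prop := ∀ (first : String) (second : String), Dom_shifted_diff first second → D_shifted_diff first second → shifted_diff first second ≠ shifted_diff_alt first second

-- ===== LEMMAS AND PROOFS =====

-- the window B searches in: (first+first)[1:2n-1]
def pvG (f : List Char) : List Char := List.drop 1 (List.take (2 * f.length - 1) (f ++ f))

lemma pvG_length (f : List Char) (h : 1 ≤ f.length) : (pvG f).length = 2 * f.length - 2 := by
  simp [pvG]; omega

-- A's loop returns -1 when no index matches
lemma pvALoop_neg (f sec : List Char) (l : List Int)
    (h : ∀ i ∈ l, ((PySem.List.slice f (some (-i)) none ++ PySem.List.slice f none (some ((f.length : Int) - i))) == sec) = false) :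
    pvALoop f sec l = -1 := by
  induction l with
  | nil => rfl
  | cons i rest ih =>
    rw [pvALoop, h i (by simp)]
    exact ih (fun j hj => h j (by simp [hj]))

-- A's loop condition at index 1 ≤ i < n is "sec is a prefix of pvG at position n-1-i"
lemma pvCond_iff (f sec : List Char) (i : Nat) (hi1 : 1 ≤ i) (hin : i < f.length)
    (hlen : sec.length = f.length) :
    ((PySem.List.slice f (some (-(i : Int))) none ++ PySem.List.slice f none (some ((f.length : Int) - (i : Int)))) == sec)
      = sec.isPrefixOf (List.drop (f.length - i - 1) (pvG f)) := by
  rw [PySem.List.slice_from_neg_natCast f i hi1]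
  have h2 : (f.length : Int) - (i:Int) = ((f.length - i : Nat) : Int) := by omega
  rw [h2, PySem.List.slice_to_natCast]
  have hg : List.drop (f.length - i - 1) (pvG f)
      = List.take (f.length + i - 1) (List.drop (f.length - i) f ++ f) := by
    unfold pvG
    rw [List.drop_drop]
    have h3 : 1 + (f.length - i - 1) = f.length - i := by omega
    rw [h3, List.drop_take, List.drop_append_of_le_length (by omega)]
    congr 1
    omega
  have hdl : (List.drop (f.length - i) f).length = i := by rw [List.length_drop]; omega
  have htake : List.take f.length (List.drop (f.length - i) f ++ f)
      = List.drop (f.length - i) f ++ List.take (f.length - i) f := by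
    rw [List.take_append, List.take_of_length_le (le_of_eq_of_le hdl (by omega)), hdl]
  rw [hg, Bool.eq_iff_iff]
  simp only [beq_iff_eq, List.isPrefixOf_iff_prefix]
  rw [List.prefix_take_iff, List.prefix_iff_eq_take, hlen, htake]
  constructor
  · intro h; exact ⟨h.symm, by omega⟩
  · intro ⟨h, _⟩; exact h.symm

-- the slice at index 1 ≤ i < n has length n, so it can never equal a sec of another length
lemma pvCond_false_of_len (f sec : List Char) (i : Nat) (hi1 : 1 ≤ i) (hin : i < f.length)
    (hlen : sec.length ≠ f.length) :
    ((PySem.List.slice f (some (-(i : Int))) none ++ PySem.List.slice f none (some ((f.length : Int) - (i : Int)))) == sec) = false := by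
  rw [PySem.List.slice_from_neg_natCast f i hi1]
  have h2 : (f.length : Int) - (i:Int) = ((f.length - i : Nat) : Int) := by omega
  rw [h2, PySem.List.slice_to_natCast, beq_eq_false_iff_ne]
  intro h
  apply hlen
  rw [← h]
  simp

-- A's i = 0 condition compares first+first with second
lemma pvCond_zero (f sec : List Char) :
    ((PySem.List.slice f (some (-((0:Nat):Int))) none ++ PySem.List.slice f none (some ((f.length : Int) - ((0:Nat):Int)))) == sec)
      = (f ++ f == sec) := by
  norm_num [PySem.List.slice_none_none]

lemma pvGo_nonneg (g sec : List Char) (j : Nat) :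
    PySem.Chars.rfind.go g sec j = -1 ∨ 0 ≤ PySem.Chars.rfind.go g sec j := by
  induction j with
  | zero => by_cases h : sec.isPrefixOf g <;> simp [PySem.Chars.rfind.go, h]
  | succ j ih =>
    by_cases h : sec.isPrefixOf (List.drop (j + 1) g) <;> simp [PySem.Chars.rfind.go, h, ih]
    right; positivity

-- positions above n-2 of pvG are too short to carry sec, so go skips them
lemma pvGo_high (f sec : List Char) (hn : 1 ≤ f.length) (hlen : sec.length = f.length) (d : Nat) :
    PySem.Chars.rfind.go (pvG f) sec (f.length - 2 + d) = PySem.Chars.rfind.go (pvG f) sec (f.length - 2) := by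
  induction d with
  | zero => rfl
  | succ d ih =>
    have hpre : sec.isPrefixOf (List.drop (f.length - 2 + d + 1) (pvG f)) = false := by
      rw [Bool.eq_false_iff]
      intro h
      have hle := (List.isPrefixOf_iff_prefix.mp h).length_le
      rw [List.length_drop, pvG_length f hn] at hle
      omega
    have h3 : f.length - 2 + (d+1) = (f.length - 2 + d) + 1 := by omega
    rw [h3]
    simp only [PySem.Chars.rfind.go, hpre]
    exact ih

-- main alignment: A's ascending scan over shifts n-L … n-1 is go's descending scan from L-1
lemma pvMain (f sec : List Char) (hlen : sec.length = f.length)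
    (L : Nat) (hL1 : 1 ≤ L) (hLn : L ≤ f.length - 1) :
    pvALoop f sec ((List.range L).map (fun t => ((f.length - L + t : Nat) : Int)))
      = if PySem.Chars.rfind.go (pvG f) sec (L - 1) = -1 then -1
        else (f.length : Int) - (1 + PySem.Chars.rfind.go (pvG f) sec (L - 1)) := by
  induction L with
  | zero => omega
  | succ L ih =>
    have hn2 : 2 ≤ f.length := by omega
    by_cases hL : L = 0
    · subst hL
      simp only [List.range_succ, List.range_zero, List.nil_append, List.map_cons, List.map_nil, pvALoop]
      have hc := pvCond_iff f sec (f.length - 1 + 0) (by omega) (by omega) hlen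
      rw [hc]
      have h4 : f.length - (f.length - 1 + 0) - 1 = 0 := by omega
      rw [h4]
      simp only [List.drop_zero, PySem.Chars.rfind.go]
      by_cases hp : sec.isPrefixOf (pvG f)
      · simp [hp]; omega
      · simp [hp]
    · have hstep : (List.range (L+1)).map (fun t => ((f.length - (L+1) + t : Nat) : Int))
          = ((f.length - (L+1) : Nat) : Int)
            :: (List.range L).map (fun t => ((f.length - L + t : Nat) : Int)) := by
        rw [List.range_succ_eq_map, List.map_cons, List.map_map]
        refine congrArg₂ List.cons (by norm_num) (List.map_congr_left fun t _ => ?_)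
        simp only [Function.comp]
        congr 1
        omega
      rw [hstep]
      simp only [pvALoop]
      have hc := pvCond_iff f sec (f.length - (L+1)) (by omega) (by omega) hlen
      rw [hc]
      have h4 : f.length - (f.length - (L+1)) - 1 = L := by omega
      rw [h4]
      have hLgo : L = (L-1)+1 := by omega
      have hgo : PySem.Chars.rfind.go (pvG f) sec (L + 1 - 1)
          = if sec.isPrefixOf (List.drop L (pvG f)) then (L : Int)
            else PySem.Chars.rfind.go (pvG f) sec (L - 1) := by
        rw [Nat.add_sub_cancel, hLgo]
        simp only [PySem.Chars.rfind.go, ← hLgo]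
      rw [hgo]
      by_cases hp : sec.isPrefixOf (List.drop L (pvG f))
      · have hne : ¬ ((L:Int) = -1) := by omega
        simp only [hp, if_pos, hne, if_false]
        omega
      · simp only [hp]
        simp only [Bool.false_eq_true, if_false]
        exact ih (by omega) (by omega)

-- range n with every element cast to Int, head peeled
lemma pvRangeCast (n : Nat) (hn : 1 ≤ n) :
    List.map (fun k : Nat => (k : Int)) (List.range n)
      = ((0:Nat):Int) :: List.map (fun t : Nat => ((n - (n - 1) + t : Nat) : Int)) (List.range (n - 1)) := by
  obtain ⟨m, rfl⟩ : ∃ m, n = m + 1 := ⟨n - 1, by omega⟩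
  rw [List.range_succ_eq_map, List.map_cons, List.map_map]
  simp only [Nat.add_sub_cancel]
  refine congrArg _ (List.map_congr_left fun t _ => ?_)
  simp only [Function.comp]
  congr 1
  omega

-- B's rfindFrom call unfolded: go over the window pvG from its top
lemma pvB_eq (f sec : List Char) (hn : 1 ≤ f.length) :
    PySem.Chars.rfindFrom (f ++ f) sec 1 (some (2 * (f.length : Int) - 1))
      = if PySem.Chars.rfind.go (pvG f) sec ((pvG f).length) = -1 then -1
        else 1 + PySem.Chars.rfind.go (pvG f) sec ((pvG f).length) := by
  unfold PySem.Chars.rfindFrom PySem.Chars.rfind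
  simp only [List.length_append]
  have h1 : ¬ (((f.length + f.length : Nat) : Int) < 2 * (f.length:Int) - 1) := by push_cast; omega
  have h2 : ¬ (2 * (f.length:Int) - 1 < 0) := by omega
  have h3 : ¬ ((1:Int) < 0) := by norm_num
  have h4 : ¬ (2 * (f.length:Int) - 1 < 1) := by omega
  simp only [if_neg h1, if_neg h2, if_neg h3, if_neg h4]
  have h5 : (2 * (f.length:Int) - 1).toNat = 2 * f.length - 1 := by omega
  have h6 : ((1:Int)).toNat = 1 := rfl
  rw [h5, h6]
  rfl

-- ===== VERDICT (by name: the statement is the Claim_ definition above) =====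
theorem shifted_diff_spec : Claim_unchanged_shifted_diff := by
  intro first second _ hD
  show shifted_diff first second = shifted_diff_alt first second
  simp only [shifted_diff, shifted_diff_alt]
  by_cases heq : (first == second) = true
  · simp [heq]
  · simp only [Bool.not_eq_true] at heq
    simp only [heq, Bool.false_eq_true, if_false]
    have hfs : first.toList ≠ second.toList := by
      intro h
      rw [String.toList_inj.mp h] at heq
      simp at heq
    rw [PySem.List.pyRange_zero_natCast]
    by_cases hlen : second.toList.length = first.toList.length
    · have hn1 : 1 ≤ first.toList.length := by
        rcases Nat.eq_zero_or_pos first.toList.length with h0 | h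
        · exact absurd (by rw [List.eq_nil_of_length_eq_zero h0,
            List.eq_nil_of_length_eq_zero (hlen.trans h0)]) hfs
        · exact h
      have hB1 : ¬ ((second.toList.length : Int) ≠ (first.toList.length : Int)) := by
        simp [hlen]
      rw [if_neg hB1, pvB_eq first.toList second.toList hn1, pvRangeCast _ hn1]
      simp only [pvALoop]
      rw [pvCond_zero]
      have h0 : (first.toList ++ first.toList == second.toList) = false := by
        rw [beq_eq_false_iff_ne]
        intro h
        have hl := congrArg List.length h
        rw [List.length_append] at hl
        omega
      rw [h0]
      simp only [Bool.false_eq_true, if_false]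
      have hgl : (pvG first.toList).length = 2 * first.toList.length - 2 := pvG_length _ hn1
      have hgo_top : PySem.Chars.rfind.go (pvG first.toList) second.toList ((pvG first.toList).length)
          = PySem.Chars.rfind.go (pvG first.toList) second.toList (first.toList.length - 2) := by
        rw [hgl, show 2 * first.toList.length - 2
            = first.toList.length - 2 + (2 * first.toList.length - 2 - (first.toList.length - 2))
          from by omega]
        exact pvGo_high _ _ hn1 hlen _
      rw [hgo_top]
      by_cases hone : first.toList.length = 1
      · have hgnil : pvG first.toList = [] := List.eq_nil_of_length_eq_zero (by rw [hgl, hone])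
        have hsne : second.toList ≠ [] := by
          intro h
          rw [h, List.length_nil] at hlen
          omega
        have hgo1 : PySem.Chars.rfind.go (pvG first.toList) second.toList (first.toList.length - 2) = -1 := by
          rw [hgnil, show first.toList.length - 2 = 0 from by omega]
          simp [PySem.Chars.rfind.go, List.isPrefixOf_iff_prefix, List.prefix_nil, hsne]
        rw [hgo1]
        simp [pvALoop, hone]
      · have hn2 : 2 ≤ first.toList.length := by omega
        rw [pvMain first.toList second.toList hlen (first.toList.length - 1) (by omega) (by omega),
          show first.toList.length - 1 - 1 = first.toList.length - 2 from by omega]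
        rcases pvGo_nonneg (pvG first.toList) second.toList (first.toList.length - 2) with hr | hr
        · rw [hr]
          norm_num
        · have hrne : PySem.Chars.rfind.go (pvG first.toList) second.toList (first.toList.length - 2) ≠ -1 := by
            omega
          rw [if_neg hrne, if_neg hrne,
            if_neg (show ¬ (1 + PySem.Chars.rfind.go (pvG first.toList) second.toList
              (first.toList.length - 2) = -1) from by omega)]
    · have hB1 : ((second.toList.length : Int) ≠ (first.toList.length : Int)) := by
        intro h
        exact hlen (by exact_mod_cast h)
      rw [if_pos hB1]
      apply pvALoop_neg
      intro i hi
      simp only [List.mem_map, List.mem_range] at hi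
      obtain ⟨k, hk, rfl⟩ := hi
      rcases Nat.eq_zero_or_pos k with rfl | hk1
      · rw [pvCond_zero, beq_eq_false_iff_ne]
        intro h
        exact hD ⟨by intro hf; rw [hf] at hk; simp at hk, h.symm⟩
      · exact pvCond_false_of_len _ _ k hk1 hk hlen

theorem shifted_diff_changed : Claim_changed_shifted_diff := by
  unfold Claim_changed_shifted_diff; decide

theorem shifted_diff_tight : Claim_exact_shifted_diff := by
  intro first second _ hd
  obtain ⟨hne, hdd⟩ := hd
  have hn1 : 1 ≤ first.toList.length := by
    rcases Nat.eq_zero_or_pos first.toList.length with h0 | h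
    · exact absurd (List.eq_nil_of_length_eq_zero h0) hne
    · exact h
  have hfs : first.toList ≠ second.toList := by
    intro h
    have := congrArg List.length (h.trans hdd)
    rw [List.length_append] at this
    omega
  have heq : (first == second) = false := by
    rw [beq_eq_false_iff_ne]
    intro h
    exact hfs (congrArg String.toList h)
  simp only [shifted_diff, shifted_diff_alt, heq, Bool.false_eq_true, if_false]
  rw [PySem.List.pyRange_zero_natCast]
  have hrange : List.range first.toList.length = 0 :: (List.range (first.toList.length - 1)).map Nat.succ := by
    conv_lhs => rw [show first.toList.length = (first.toList.length - 1) + 1 from by omega,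
      List.range_succ_eq_map]
  rw [hrange, List.map_cons]
  simp only [pvALoop]
  rw [pvCond_zero]
  have h0 : (first.toList ++ first.toList == second.toList) = true := by
    rw [beq_iff_eq]
    exact hdd.symm
  rw [h0]
  simp only [if_true]
  have hB1 : ((second.toList.length : Int) ≠ (first.toList.length : Int)) := by
    have := congrArg List.length hdd
    rw [List.length_append] at this
    omega
  rw [if_pos hB1]
  norm_num
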